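-- pv_equiv track=rewrite | github.com/guose1314/tcmautoresearch | tools/continuous_improvement_loop.py | _select_lowest_dimensions
-- ===== SOURCE A (Python) =====
-- from typing import Any, Dict, List
--
-- def _select_lowest_dimensions(dimension_scores: Dict[str, object], count: int = 2) -> List[str]:
--     pairs = []
--     for name, score in dimension_scores.items():
--         try:
--             pairs.append((name, float(score)))
--         except Exception:
--             continue
--     pairs.sort(key=lambda item: item[1])
--     return [name for name, _ in pairs[:count]]
-- ===== SOURCE B (Python) =====
-- from typing import Any, Dict, List
--
-- def _select_lowest_dimensions(dimension_scores: Dict[str, object], count: int = 2) -> List[str]: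
--     # Partial selection: keep a sorted buffer of the `count` lowest-scoring
--     # entries seen so far; no full sort. Selecting a nonpositive number of
--     # dimensions yields none.
--     if count <= 0:
--         return []
--     best = []  # at most `count` tuples (score, insertion index, name), ascending
--     for idx, (name, score) in enumerate(dimension_scores.items()):
--         try:
--             entry = (float(score), idx, name)
--         except Exception:
--             continue
--         if len(best) == count:
--             if entry >= best[-1]:
--                 continue
--             best.pop()
--         i = 0
--         while i < len(best) and best[i] <= entry:
--             i += 1
--         best.insert(i, entry)
--     return [name for _, _, name in best]
-- ===== Notes on version B (the rewrite author's own statement) =====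
-- stated objective: alternative
-- what changed: Replaces the full sort-then-slice with a one-pass bounded partial selection: a sorted buffer of at most `count` entries is maintained (skip when the new score is not below the buffer's worst, otherwise insert in place), so the whole list is never sorted.
-- intended difference: For count < 0 with more than |count| entries, A's pairs[:count] slice accidentally returns all names except the last |count| of the sorted order, while B returns [] — the intended result of selecting a nonpositive number of lowest dimensions. — e.g. on _select_lowest_dimensions([("a", 1), ("b", 2)], -1): A returns ["a"], B returns []
import Mathlib
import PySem

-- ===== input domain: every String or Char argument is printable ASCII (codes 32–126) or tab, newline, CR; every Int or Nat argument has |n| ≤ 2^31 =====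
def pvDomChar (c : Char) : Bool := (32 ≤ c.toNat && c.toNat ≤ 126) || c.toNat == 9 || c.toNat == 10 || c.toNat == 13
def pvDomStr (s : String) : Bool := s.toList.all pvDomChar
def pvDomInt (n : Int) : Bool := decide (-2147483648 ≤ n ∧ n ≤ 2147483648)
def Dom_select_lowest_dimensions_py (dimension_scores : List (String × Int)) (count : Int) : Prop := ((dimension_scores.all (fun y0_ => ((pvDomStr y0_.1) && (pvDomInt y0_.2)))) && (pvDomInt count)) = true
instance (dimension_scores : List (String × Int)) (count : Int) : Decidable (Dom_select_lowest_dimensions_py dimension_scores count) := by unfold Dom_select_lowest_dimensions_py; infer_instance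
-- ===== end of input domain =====

-- B replaces A's full sort-then-slice by a one-pass bounded partial selection (buffer of the
-- `count` lowest entries); objective: alternative algorithm, same results except the D_ corner below.
-- A mutates nothing observable (it sorts only its private `pairs` list); equivalence is about the return value.

-- ===== PORT A =====
-- On Dom, every score is an Int with |n| ≤ 2^31, so float(score) is exact and never raises:
-- the try/except keeps every pair.
def select_lowest_dimensions_py (dimension_scores : List (String × Int)) (count : Int) : List String :=
  let pairs := dimension_scores.foldl (fun acc p => acc ++ [(p.1, p.2)]) []
  let sortedPairs := PySem.List.sorted pairs (fun item => item.2) false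
  (PySem.List.slice sortedPairs none (some count)).map (fun p => p.1)

-- ===== PORT B =====
-- Source B's buffer entry (score, idx, name) as ((score, idx), name); the enumerate indices are
-- pairwise distinct, so Python's tuple comparison never reaches the name component: comparing
-- (score, idx) lexicographically is exact.
def pvEntryLe (a b : (Int × Int) × String) : Bool :=
  decide (a.1.1 < b.1.1) || (decide (a.1.1 = b.1.1) && decide (a.1.2 ≤ b.1.2))

-- Source B's linear scan `while i < len(best) and best[i] <= entry` followed by `best.insert(i, entry)`
def pvInsLin (entry : (Int × Int) × String) : List ((Int × Int) × String) → List ((Int × Int) × String)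
  | [] => [entry]
  | b :: bs => if pvEntryLe b entry then b :: pvInsLin entry bs else entry :: b :: bs

-- one iteration of Source B's for-loop body; when the length guard holds the buffer is nonempty
-- (length = count > 0), so the getLastD default is never read
def pvStepB (count : Int) (best : List ((Int × Int) × String)) (p : Int × (String × Int)) :
    List ((Int × Int) × String) :=
  let entry : (Int × Int) × String := ((p.2.2, p.1), p.2.1)
  if (best.length : Int) = count then
    if pvEntryLe (best.getLastD ((0, 0), "")) entry then best
    else pvInsLin entry best.dropLast
  else pvInsLin entry best

def select_lowest_dimensions_py_alt (dimension_scores : List (String × Int)) (count : Int) : List String :=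
  if count ≤ 0 then []
  else
    let best := (PySem.List.enumerate dimension_scores).foldl (pvStepB count) []
    best.map (fun e => e.2)

-- ===== PRECONDITION & SPEC =====
-- For count < 0 with more than |count| entries, A's pairs[:count] slice accidentally returns all
-- names except the last |count| of the sorted order, while B returns [] — the intended result of
-- selecting a nonpositive number of lowest dimensions.
def D_select_lowest_dimensions_py (dimension_scores : List (String × Int)) (count : Int) : Prop :=
  count < 0 ∧ 0 < (dimension_scores.length : Int) + count
instance (dimension_scores : List (String × Int)) (count : Int) : Decidable (D_select_lowest_dimensions_py dimension_scores count) := by unfold D_select_lowest_dimensions_py; infer_instance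

def Spec_select_lowest_dimensions_py (dimension_scores : List (String × Int)) (count : Int) (out : List String) : Prop := ¬ D_select_lowest_dimensions_py dimension_scores count → out = select_lowest_dimensions_py_alt dimension_scores count
instance (dimension_scores : List (String × Int)) (count : Int) (out : List String) : Decidable (Spec_select_lowest_dimensions_py dimension_scores count out) := by unfold Spec_select_lowest_dimensions_py; infer_instance

def pvDiffWitness_select_lowest_dimensions_py : (List (String × Int)) × Int := ([("a", 1), ("b", 2)], -1)
def pvDiffWitnessOut_select_lowest_dimensions_py : (List String) × (List String) := (["a"], [])

-- ===== CLAIM (what is proved, stated in full; the proofs are below) =====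
def Claim_unchanged_select_lowest_dimensions_py : Prop := ∀ (dimension_scores : List (String × Int)) (count : Int), Dom_select_lowest_dimensions_py dimension_scores count → Spec_select_lowest_dimensions_py dimension_scores count (select_lowest_dimensions_py dimension_scores count)
def Claim_changed_select_lowest_dimensions_py : Prop := Dom_select_lowest_dimensions_py (pvDiffWitness_select_lowest_dimensions_py.1) (pvDiffWitness_select_lowest_dimensions_py.2) ∧ D_select_lowest_dimensions_py (pvDiffWitness_select_lowest_dimensions_py.1) (pvDiffWitness_select_lowest_dimensions_py.2) ∧ select_lowest_dimensions_py (pvDiffWitness_select_lowest_dimensions_py.1) (pvDiffWitness_select_lowest_dimensions_py.2) = pvDiffWitnessOut_select_lowest_dimensions_py.1 ∧ select_lowest_dimensions_py_alt (pvDiffWitness_select_lowest_dimensions_py.1) (pvDiffWitness_select_lowest_dimensions_py.2) = pvDiffWitnessOut_select_lowest_dimensions_py.2 ∧ pvDiffWitnessOut_select_lowest_dimensions_py.1 ≠ pvDiffWitnessOut_select_lowest_dimensions_py.2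
def Claim_exact_select_lowest_dimensions_py : Prop := ∀ (dimension_scores : List (String × Int)) (count : Int), Dom_select_lowest_dimensions_py dimension_scores count → D_select_lowest_dimensions_py dimension_scores count → select_lowest_dimensions_py dimension_scores count ≠ select_lowest_dimensions_py_alt dimension_scores count

-- ===== LEMMAS AND PROOFS =====

-- the strict-key comparison A's insertion sort uses: `before a b` = score a < score b
def pvBefore (a b : (Int × Int) × String) : Bool := decide (a.1.1 < b.1.1)

-- a nonempty list's getLastD does not depend on the default
theorem getLastD_indep {α : Type} (t : List α) (ht : t ≠ []) (d1 d2 : α) :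
    t.getLastD d1 = t.getLastD d2 := by
  cases t with
  | nil => simp at ht
  | cons a l => rw [List.getLastD_eq_getLast?, List.getLastD_eq_getLast?,
      List.getLast?_eq_some_getLast (by simp)]; rfl

theorem getLastD_mem {α : Type} (t : List α) (ht : t ≠ []) (d : α) :
    t.getLastD d ∈ t := by
  rw [List.getLastD_eq_getLast?, List.getLast?_eq_some_getLast ht]
  exact List.getLast_mem ht

theorem take_ne_nil {α : Type} (l : List α) (n : Nat) (hn : 0 < n) (hl : l ≠ []) :
    l.take n ≠ [] := by
  intro hcon
  rcases List.take_eq_nil_iff.mp hcon with h | h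
  · omega
  · exact hl h

theorem dropLast_take_aux {α : Type} (xs : List α) (n : Nat) (h : n ≤ xs.length) :
    (xs.take n).dropLast = xs.take (n - 1) := by
  rw [List.dropLast_eq_take, List.take_take, List.length_take]
  congr 1
  omega

-- with a strictly larger idx, Python's tuple ≤/≥ reduces to comparing scores
theorem pvEntryLe_eq_not_before (x e : (Int × Int) × String) (h : x.1.2 < e.1.2) :
    pvEntryLe x e = !pvBefore e x := by
  simp only [pvEntryLe, pvBefore]
  by_cases h1 : x.1.1 < e.1.1 <;> by_cases h2 : x.1.1 = e.1.1 <;> simp [h1, h2] <;> omega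

-- Source B's linear insertion is insertBy-on-score when every buffer idx is below the entry's
theorem pvInsLin_eq_insertBy (e : (Int × Int) × String) (xs : List ((Int × Int) × String))
    (h : ∀ x ∈ xs, x.1.2 < e.1.2) :
    pvInsLin e xs = PySem.List.insertBy pvBefore e xs := by
  induction xs with
  | nil => rfl
  | cons x xs ih =>
    have hx := pvEntryLe_eq_not_before x e (h x (by simp))
    simp only [pvInsLin, PySem.List.insertBy, hx]
    cases hb : pvBefore e x <;>
      simp [ih (fun y hy => h y (by simp [hy]))]

theorem length_insertBy (b : (Int × Int) × String → (Int × Int) × String → Bool)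
    (e : (Int × Int) × String) (xs : List ((Int × Int) × String)) :
    (PySem.List.insertBy b e xs).length = xs.length + 1 := by
  induction xs with
  | nil => rfl
  | cons x xs ih =>
    simp only [PySem.List.insertBy]
    split <;> simp [ih]

theorem insertBy_pairwise (e : (Int × Int) × String) (xs : List ((Int × Int) × String))
    (h : xs.Pairwise (fun a b => a.1.1 ≤ b.1.1)) :
    (PySem.List.insertBy pvBefore e xs).Pairwise (fun a b => a.1.1 ≤ b.1.1) := by
  induction xs with
  | nil => simp [PySem.List.insertBy]
  | cons x xs ih =>
    rcases List.pairwise_cons.mp h with ⟨hx, hxs⟩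
    simp only [PySem.List.insertBy]
    cases hb : pvBefore e x with
    | true =>
      have he : e.1.1 ≤ x.1.1 := le_of_lt (by simpa [pvBefore] using hb)
      simp only [if_true]
      refine List.pairwise_cons.mpr ⟨?_, h⟩
      intro y hy
      rcases List.mem_cons.mp hy with rfl | hy
      · exact he
      · exact le_trans he (hx y hy)
    | false =>
      simp only [Bool.false_eq_true, if_false]
      refine List.pairwise_cons.mpr ⟨?_, ih hxs⟩
      intro y hy
      rcases (PySem.List.mem_insertBy pvBefore e y xs).mp hy with heq | hy
      · have hb' : ¬ e.1.1 < x.1.1 := by simpa [pvBefore] using hb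
        rw [heq]; omega
      · exact hx y hy

-- inserting then truncating to k, on a sorted list, is Source B's full-buffer step
theorem take_insertBy_sorted (xs : List ((Int × Int) × String)) (e : (Int × Int) × String)
    (k : Nat) (hk : 0 < k) (hlen : k ≤ xs.length)
    (hs : xs.Pairwise (fun a b => a.1.1 ≤ b.1.1)) :
    (PySem.List.insertBy pvBefore e xs).take k =
      if pvBefore e ((xs.take k).getLastD ((0, 0), "")) then
        PySem.List.insertBy pvBefore e (xs.take k).dropLast
      else xs.take k := by
  induction xs generalizing k with
  | nil => simp at hlen; omega
  | cons x xs ih =>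
    rcases List.pairwise_cons.mp hs with ⟨hx, hxs⟩
    cases hb : pvBefore e x with
    | true =>
      have hne : (x :: xs).take k ≠ [] := take_ne_nil _ _ hk (by simp)
      have hlast : pvBefore e (((x :: xs).take k).getLastD ((0, 0), "")) = true := by
        have hmem' := List.mem_of_mem_take (getLastD_mem _ hne (((0, 0), "") : (Int × Int) × String))
        have hxle : x.1.1 ≤ (((x :: xs).take k).getLastD ((0, 0), "")).1.1 := by
          rcases List.mem_cons.mp hmem' with heq | hmem''
          · rw [heq]
          · exact hx _ hmem''
        have : e.1.1 < x.1.1 := by simpa [pvBefore] using hb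
        simp only [pvBefore, decide_eq_true_eq]
        omega
      rw [hlast]
      simp only [PySem.List.insertBy, hb]
      rw [dropLast_take_aux _ _ (by simpa using hlen)]
      cases k with
      | zero => omega
      | succ k' =>
        cases k' with
        | zero => simp [PySem.List.insertBy]
        | succ k'' =>
          simp only [Nat.add_sub_cancel, List.take_succ_cons]
          simp [PySem.List.insertBy, hb]
    | false =>
      simp only [PySem.List.insertBy, hb, Bool.false_eq_true, if_false]
      cases k with
      | zero => omega
      | succ k' =>
        cases k'' : k' with
        | zero =>
          subst k''
          simp [List.take_succ_cons, hb]
        | succ m =>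
          subst k''
          have hlen' : m + 1 ≤ xs.length := by
            have := hlen; simp at this; omega
          have hne : xs.take (m + 1) ≠ [] := by
            apply take_ne_nil _ _ (by omega)
            intro h; subst h; simp at hlen'
          simp only [List.take_succ_cons]
          have hlastswap : ((x :: xs.take (m + 1))).getLastD (((0, 0), "") : (Int × Int) × String) =
              (xs.take (m + 1)).getLastD ((0, 0), "") := by
            rw [List.getLastD_cons]
            exact getLastD_indep _ hne _ _
          rw [hlastswap]
          rw [ih (m + 1) (by omega) hlen' hxs]
          cases hc : pvBefore e ((xs.take (m + 1)).getLastD ((0, 0), "")) with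
          | true =>
            simp only [if_true]
            rw [List.dropLast_cons_of_ne_nil hne]
            simp [PySem.List.insertBy, hb]
          | false =>
            simp

-- one step of Source B's loop = insert-then-truncate on the full sorted accumulator
theorem pvStepB_eq (acc : List ((Int × Int) × String)) (p : Int × (String × Int)) (k : Nat)
    (hk : 0 < k)
    (hs : acc.Pairwise (fun a b => a.1.1 ≤ b.1.1))
    (hidx : ∀ a ∈ acc, a.1.2 < p.1) :
    pvStepB (k : Int) (acc.take k) p =
      (PySem.List.insertBy pvBefore ((p.2.2, p.1), p.2.1) acc).take k := by
  set e : (Int × Int) × String := ((p.2.2, p.1), p.2.1) with he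
  by_cases hge : k ≤ acc.length
  · have hlenbest : (acc.take k).length = k := by simp; omega
    have hguard : ((acc.take k).length : Int) = (k : Int) := by rw [hlenbest]
    have hne : acc.take k ≠ [] := by
      apply take_ne_nil _ _ hk
      intro h; subst h; simp at hge; omega
    have hlastmem : (acc.take k).getLastD ((0, 0), "") ∈ acc :=
      List.mem_of_mem_take (getLastD_mem _ hne _)
    have hEL : pvEntryLe ((acc.take k).getLastD ((0, 0), "")) e =
        !pvBefore e ((acc.take k).getLastD ((0, 0), "")) :=
      pvEntryLe_eq_not_before _ _ (hidx _ hlastmem)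
    rw [take_insertBy_sorted acc e k hk hge hs]
    simp only [pvStepB]
    rw [if_pos hguard, hEL]
    cases hc : pvBefore e ((acc.take k).getLastD ((0, 0), "")) with
    | true =>
      simp only [Bool.not_true, Bool.false_eq_true, if_false, if_true]
      exact pvInsLin_eq_insertBy e _ (fun x hx =>
        hidx x (List.mem_of_mem_take (List.dropLast_subset _ hx)))
    | false =>
      simp only [Bool.not_false, if_true, Bool.false_eq_true, if_false]
  · have htake : acc.take k = acc := List.take_of_length_le (by omega)
    have hguard : ¬ ((acc.length : Int) = (k : Int)) := by
      intro h
      have : acc.length = k := by exact_mod_cast h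
      omega
    rw [htake]
    simp only [pvStepB, hguard, if_false]
    rw [pvInsLin_eq_insertBy e _ hidx]
    symm
    apply List.take_of_length_le
    rw [length_insertBy]
    omega

-- every index produced by enumerate is ≥ the start
theorem enumerate_fst_ge {α : Type} (xs : List α) (s : Int) :
    ∀ p ∈ PySem.List.enumerate xs s, s ≤ p.1 := by
  induction xs generalizing s with
  | nil => simp [PySem.List.enumerate]
  | cons x xs ih =>
    intro p hp
    rw [PySem.List.enumerate_cons] at hp
    rcases List.mem_cons.mp hp with rfl | hp
    · exact le_refl _
    · have := ih (s + 1) p hp; omega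

theorem enumerate_pairwise_fst {α : Type} (xs : List α) (s : Int) :
    (PySem.List.enumerate xs s).Pairwise (fun p q => p.1 < q.1) := by
  induction xs generalizing s with
  | nil => simp [PySem.List.enumerate]
  | cons x xs ih =>
    rw [PySem.List.enumerate_cons]
    refine List.pairwise_cons.mpr ⟨?_, ih (s + 1)⟩
    intro q hq
    have := enumerate_fst_ge xs (s + 1) q hq
    simpa using lt_of_lt_of_le (by omega : s < s + 1) this

-- the loop invariant: Source B's buffer is the k-truncation of the full insertion sort
theorem pvMain (ps : List (Int × (String × Int))) (acc : List ((Int × Int) × String)) (k : Nat)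
    (hk : 0 < k)
    (hs : acc.Pairwise (fun a b => a.1.1 ≤ b.1.1))
    (hidx : ∀ a ∈ acc, ∀ p ∈ ps, a.1.2 < p.1)
    (hps : ps.Pairwise (fun p q => p.1 < q.1)) :
    List.foldl (pvStepB (k : Int)) (acc.take k) ps =
      (List.foldl (fun l p => PySem.List.insertBy pvBefore ((p.2.2, p.1), p.2.1) l) acc ps).take k := by
  induction ps generalizing acc with
  | nil => rfl
  | cons p ps ih =>
    rcases List.pairwise_cons.mp hps with ⟨hp, hps'⟩
    simp only [List.foldl_cons]
    rw [pvStepB_eq acc p k hk hs (fun a ha => hidx a ha p (by simp))]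
    exact ih (PySem.List.insertBy pvBefore ((p.2.2, p.1), p.2.1) acc)
      (insertBy_pairwise _ _ hs)
      (fun a ha q hq => by
        rcases (PySem.List.mem_insertBy _ _ a acc).mp ha with rfl | ha
        · exact hp q hq
        · exact lt_trans (hidx a ha p (by simp)) (hp q hq))
      hps'

-- insertBy commutes with map when the keys agree
theorem insertBy_map {α β κ : Type} [LinearOrder κ] (f : α → β) (key : β → κ) (x : α) (ys : List α) :
    PySem.List.insertBy (fun a b => decide (key a < key b)) (f x) (ys.map f) =
      (PySem.List.insertBy (fun a b => decide (key (f a) < key (f b))) x ys).map f := by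
  induction ys with
  | nil => rfl
  | cons y ys ih =>
    simp only [List.map_cons, PySem.List.insertBy]
    split <;> simp [ih]

-- a stable sort of a mapped list is the mapped stable sort (key composed)
theorem sorted_map {α β κ : Type} [LinearOrder κ] (f : α → β) (key : β → κ) (xs : List α) :
    PySem.List.sorted (xs.map f) key false =
      (PySem.List.sorted xs (fun x => key (f x)) false).map f := by
  rw [PySem.List.sorted_eq_foldl_insertBy, PySem.List.sorted_eq_foldl_insertBy]
  have H : ∀ (xs : List α) (acc : List α),
      List.foldl (fun acc x => PySem.List.insertBy (fun a b => decide (key a < key b)) x acc)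
        (acc.map f) (xs.map f) =
      (List.foldl (fun acc x => PySem.List.insertBy (fun a b => decide (key (f a) < key (f b))) x acc)
        acc xs).map f := by
    intro xs
    induction xs with
    | nil => intro acc; rfl
    | cons x xs ih =>
      intro acc
      simp only [List.map_cons, List.foldl_cons]
      rw [insertBy_map f key x acc, ih]
  simpa using H xs []

-- A's pair-building loop keeps every pair
theorem pairsA_eq (ds : List (String × Int)) :
    ds.foldl (fun acc p => acc ++ [(p.1, p.2)]) [] = ds := by
  have := PySem.List.foldl_append_singleton_eq_map (fun p : String × Int => (p.1, p.2)) ds []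
  simpa using this

-- the decorated list Source B's buffer draws from
def pvDecor (ds : List (String × Int)) : List ((Int × Int) × String) :=
  (PySem.List.enumerate ds).map (fun p => ((p.2.2, p.1), p.2.1))

-- A's stable sort of the pairs is the stripped stable sort of the decorated list
theorem sortedA_eq_decor (ds : List (String × Int)) :
    PySem.List.sorted ds (fun item => item.2) false =
      (PySem.List.sorted (pvDecor ds) (fun e => e.1.1) false).map (fun e => (e.2, e.1.1)) := by
  have hmap : (pvDecor ds).map (fun e => (e.2, e.1.1)) = ds := by
    simp only [pvDecor, List.map_map]
    have : ((fun e : (Int × Int) × String => (e.2, e.1.1)) ∘ fun p : Int × (String × Int) => ((p.2.2, p.1), p.2.1)) =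
        fun p : Int × (String × Int) => p.2 := by
      funext p; simp
    rw [this, PySem.List.map_snd_enumerate]
  have h := sorted_map (fun e : (Int × Int) × String => (e.2, e.1.1)) (fun p : String × Int => p.2) (pvDecor ds)
  rw [hmap] at h
  simpa using h

-- main agreement on positive count
theorem agree_pos (ds : List (String × Int)) (count : Int) (hc : 0 < count) :
    select_lowest_dimensions_py ds count = select_lowest_dimensions_py_alt ds count := by
  have hk : 0 < count.toNat := by omega
  have hck : ((count.toNat : Int)) = count := Int.toNat_of_nonneg (by omega)
  simp only [select_lowest_dimensions_py, select_lowest_dimensions_py_alt,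
    if_neg (not_le.mpr hc)]
  rw [pairsA_eq, PySem.List.slice_to _ (by omega : (0:Int) ≤ count)]
  -- B's loop = truncated insertion sort of the decorated list
  have hmain := pvMain (PySem.List.enumerate ds) [] count.toNat hk (by simp) (by simp)
    (enumerate_pairwise_fst ds 0)
  rw [List.take_nil] at hmain
  rw [← hck, hmain, Int.toNat_natCast]
  have hfold : (List.foldl (fun l p => PySem.List.insertBy pvBefore ((p.2.2, p.1), p.2.1) l) []
      (PySem.List.enumerate ds)) = PySem.List.sorted (pvDecor ds) (fun e => e.1.1) false := by
    rw [PySem.List.sorted_eq_foldl_insertBy (pvDecor ds) (fun e : (Int × Int) × String => e.1.1)]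
    unfold pvDecor pvBefore
    rw [List.foldl_map]
  rw [hfold, sortedA_eq_decor]
  rw [List.map_take, List.map_map, List.map_take]
  rfl

-- ===== VERDICT (by name: the statement is the Claim_ definition above) =====
theorem select_lowest_dimensions_py_spec : Claim_unchanged_select_lowest_dimensions_py := by
  intro ds count _ hnd
  by_cases hc : 0 < count
  · exact agree_pos ds count hc
  · -- count ≤ 0: both sides are []
    have hle : count ≤ 0 := by omega
    have hb : select_lowest_dimensions_py_alt ds count = [] := by
      simp [select_lowest_dimensions_py_alt, hle]
    rw [hb]
    simp only [select_lowest_dimensions_py]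
    rw [pairsA_eq]
    rcases hle.lt_or_eq with hneg | h0
    swap
    · rw [h0, PySem.List.slice_to _ (le_refl 0)]
      simp
    · have hlen : (ds.length : Int) + count ≤ 0 := by
        by_contra hcon
        exact hnd ⟨hneg, by omega⟩
      have hkpos : 0 < (-count).toNat := by omega
      have hck : count = -(((-count).toNat : Int)) := by omega
      rw [hck, PySem.List.slice_to_neg_natCast _ _ hkpos]
      have hsl : (PySem.List.sorted ds (fun item : String × Int => item.2) false).length = ds.length :=
        PySem.List.length_sorted _ _ _
      rw [hsl]
      have hz : ds.length - (-count).toNat = 0 := by omega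
      rw [hz]
      simp

theorem select_lowest_dimensions_py_changed : Claim_changed_select_lowest_dimensions_py := by
  unfold Claim_changed_select_lowest_dimensions_py; decide

theorem select_lowest_dimensions_py_tight : Claim_exact_select_lowest_dimensions_py := by
  intro ds count _ hd
  rcases hd with ⟨hneg, hlen⟩
  have hle : count ≤ 0 := by omega
  have hb : select_lowest_dimensions_py_alt ds count = [] := by
    simp [select_lowest_dimensions_py_alt, hle]
  rw [hb]
  intro hcon
  have hkpos : 0 < (-count).toNat := by omega
  have hck : count = -(((-count).toNat : Int)) := by omega
  have hlenA : (select_lowest_dimensions_py ds count).length = ds.length - (-count).toNat := by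
    simp only [select_lowest_dimensions_py]
    rw [pairsA_eq, hck, PySem.List.slice_to_neg_natCast _ _ hkpos]
    rw [List.length_map, List.length_take, PySem.List.length_sorted]
    omega
  rw [hcon] at hlenA
  simp at hlenA
  omega
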